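-- pv_equiv track=rewrite | github.com/adarshsingh994/Practice | Python/WeightedUniformString.py | getWeightMap
-- ===== SOURCE A (Python) =====
-- def getWeightMap(s):
--     currentChar = ''
--     weightMap = dict()
--     currentWeight = 0
--     for character in s:
--         if currentChar == '':
--             currentChar = character
--             weight = ord(character) - 96
--             currentWeight = weight
--         else:
--             if character == currentChar:
--                 weight = ord(character) - 96
--                 currentWeight += weight
--             else:
--                 weight = ord(character) - 96
--                 currentChar = character
--                 currentWeight = weight
--         weightMap[currentWeight] = True
--     return(weightMap)
-- ===== SOURCE B (Python) =====
-- def getWeightMap(s):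
--     weightMap = {}
--     chars = list(s)
--     n = len(chars)
--     pos = 0
--     while pos < n:
--         c = chars[pos]
--         run = 1
--         while pos + run < n and chars[pos + run] == c:
--             run += 1
--         w = ord(c) - 96
--         for k in range(1, run + 1):
--             weightMap[k * w] = True
--         pos += run
--     return weightMap
-- ===== Notes on version B (the rewrite author's own statement) =====
-- stated objective: alternative
-- what changed: A's per-character state machine (tracking currentChar and a running weight) is replaced by an outer scan over maximal runs of equal characters with an inner loop storing k*weight for k=1..runLength.
import Mathlib
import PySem

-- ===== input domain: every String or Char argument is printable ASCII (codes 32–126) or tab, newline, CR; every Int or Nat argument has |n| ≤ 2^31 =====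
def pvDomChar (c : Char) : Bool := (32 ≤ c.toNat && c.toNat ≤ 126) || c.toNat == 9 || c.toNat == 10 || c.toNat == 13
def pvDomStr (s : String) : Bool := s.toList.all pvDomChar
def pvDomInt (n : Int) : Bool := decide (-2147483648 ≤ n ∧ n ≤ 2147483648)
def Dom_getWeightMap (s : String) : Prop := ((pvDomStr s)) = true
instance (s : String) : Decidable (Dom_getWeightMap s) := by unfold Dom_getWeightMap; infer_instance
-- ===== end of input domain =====

-- B replaces A's per-character state machine (current char + running weight) by an outer scan over
-- maximal runs plus an inner multiplicative loop k*w, k = 1..run; objective: alternative decomposition.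

-- ===== PORT A =====
-- A's for-loop over the characters; state = (currentChar, weightMap, currentWeight).
-- ord(character) - 96 is ported as (ch.toNat : Int) - 96, exact on the ASCII domain.
def pvLoopA : List Char → String → PySem.Dict Int Bool → Int → PySem.Dict Int Bool
  | [], _, wm, _ => wm
  | ch :: rest, currentChar, wm, currentWeight =>
    if currentChar == "" then
      let weight : Int := (ch.toNat : Int) - 96
      pvLoopA rest (String.singleton ch) (wm.insert weight true) weight
    else if String.singleton ch == currentChar then
      let weight : Int := (ch.toNat : Int) - 96
      pvLoopA rest currentChar (wm.insert (currentWeight + weight) true) (currentWeight + weight)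
    else
      let weight : Int := (ch.toNat : Int) - 96
      pvLoopA rest (String.singleton ch) (wm.insert weight true) weight

def getWeightMap (s : String) : List (Int × Bool) :=
  (pvLoopA s.toList "" PySem.Dict.empty 0).items

-- ===== PORT B =====
-- B's inner while loop: how many characters after the run head still equal it.
def pvRunB : List Char → Char → Nat
  | [], _ => 0
  | x :: xs, c => if x == c then 1 + pvRunB xs c else 0

-- B's outer while loop; advancing pos by run is consuming the run from the char list.
def pvLoopB : List Char → PySem.Dict Int Bool → PySem.Dict Int Bool
  | [], wm => wm
  | c :: rest, wm =>
    let run : Nat := 1 + pvRunB rest c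
    let w : Int := (c.toNat : Int) - 96
    let wm' := (PySem.List.pyRange 1 ((run : Int) + 1) 1).foldl (fun d k => d.insert (k * w) true) wm
    pvLoopB (rest.drop (pvRunB rest c)) wm'
  termination_by chars _ => chars.length
  decreasing_by simp [List.length_drop]

def getWeightMap_alt (s : String) : List (Int × Bool) :=
  (pvLoopB s.toList PySem.Dict.empty).items

-- ===== PRECONDITION & SPEC =====
def Spec_getWeightMap (s : String) (out : List (Int × Bool)) : Prop := out = getWeightMap_alt s
instance (s : String) (out : List (Int × Bool)) : Decidable (Spec_getWeightMap s out) := by unfold Spec_getWeightMap; infer_instance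

-- ===== CLAIM (what is proved, stated in full; the proofs are below) =====
def Claim_equal_getWeightMap : Prop := ∀ (s : String), Dom_getWeightMap s → Spec_getWeightMap s (getWeightMap s)

-- ===== LEMMAS AND PROOFS =====

theorem pv_singleton_ne_empty (c : Char) : (String.singleton c == "") = false := by
  simp [String.singleton]

theorem pv_singleton_beq (a b : Char) :
    (String.singleton a == String.singleton b) = (a == b) := by
  simp [String.singleton]

theorem pvLoopB_nil (wm : PySem.Dict Int Bool) : pvLoopB [] wm = wm := by
  rw [pvLoopB.eq_def]

theorem pvLoopB_cons (c : Char) (rest : List Char) (wm : PySem.Dict Int Bool) :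
    pvLoopB (c :: rest) wm
      = pvLoopB (rest.drop (pvRunB rest c))
          ((PySem.List.pyRange 1 (((1 + pvRunB rest c : Nat) : Int) + 1) 1).foldl
            (fun d k => d.insert (k * ((c.toNat : Int) - 96)) true) wm) := by
  rw [pvLoopB.eq_def]

-- after dropping the matching part of a run, the next character (if any) differs from the run head
theorem pvRunB_drop_head : ∀ (rest : List Char) (c x : Char) (xs : List Char),
    rest.drop (pvRunB rest c) = x :: xs → (x == c) = false := by
  intro rest
  induction rest with
  | nil => intro c x xs h; simp [pvRunB] at h
  | cons y ys ih =>
    intro c x xs h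
    by_cases hy : (y == c) = true
    · have hstep : pvRunB (y :: ys) c = pvRunB ys c + 1 := by
        simp [pvRunB, hy]; omega
      rw [hstep, List.drop_succ_cons] at h
      exact ih c x xs h
    · simp [pvRunB, hy] at h
      rw [← h.1]
      simpa using hy

-- index-shifted run fold: inserting (1+k)*w for k < r+1 is inserting w first, then w+(k+1)*w for k < r
theorem pv_fold_shift (w : Int) (r : Nat) (wm : PySem.Dict Int Bool) :
    (List.range (r + 1)).foldl (fun d (k : Nat) => d.insert ((1 + (k : Int)) * w) true) wm
      = (List.range r).foldl (fun d (k : Nat) => d.insert (w + ((k : Int) + 1) * w) true) (wm.insert w true) := by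
  rw [List.range_succ_eq_map]
  simp only [List.foldl_cons, List.foldl_map, Nat.cast_zero, add_zero, one_mul]
  apply PySem.List.foldl_congr_mem
  intro acc k _
  congr 1
  push_cast
  ring

-- A consumes a whole run of c: the dict gains cw+w, cw+2w, …, cw+r*w and the weight advances by r*w
theorem pv_runA : ∀ (rest : List Char) (c : Char) (wm : PySem.Dict Int Bool) (cw : Int),
    pvLoopA rest (String.singleton c) wm cw
      = pvLoopA (rest.drop (pvRunB rest c)) (String.singleton c)
          ((List.range (pvRunB rest c)).foldl
            (fun d (k : Nat) => d.insert (cw + ((k : Int) + 1) * ((c.toNat : Int) - 96)) true) wm)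
          (cw + (pvRunB rest c : Int) * ((c.toNat : Int) - 96)) := by
  intro rest
  induction rest with
  | nil => intro c wm cw; simp [pvRunB]
  | cons x xs ih =>
    intro c wm cw
    by_cases hx : (x == c) = true
    · have hxc : x = c := by simpa using hx
      subst hxc
      rw [pvLoopA, if_neg (by simp [pv_singleton_ne_empty x]),
          if_pos (by simp)]
      rw [ih x (wm.insert (cw + ((x.toNat : Int) - 96)) true) (cw + ((x.toNat : Int) - 96))]
      have hr : pvRunB (x :: xs) x = pvRunB xs x + 1 := by simp [pvRunB]; omega
      rw [hr]
      simp only [List.drop_succ_cons]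
      rw [List.range_succ_eq_map]
      simp only [List.foldl_cons, List.foldl_map, Nat.cast_zero, zero_add, one_mul]
      have hfold :
          (List.range (pvRunB xs x)).foldl
              (fun d (k : Nat) => d.insert (cw + ((x.toNat : Int) - 96) + ((k : Int) + 1) * ((x.toNat : Int) - 96)) true)
              (wm.insert (cw + ((x.toNat : Int) - 96)) true)
            = (List.range (pvRunB xs x)).foldl
              (fun d (k : Nat) => d.insert (cw + (((k + 1 : Nat) : Int) + 1) * ((x.toNat : Int) - 96)) true)
              (wm.insert (cw + ((x.toNat : Int) - 96)) true) := by
        apply PySem.List.foldl_congr_mem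
        intro acc k _
        congr 1
        push_cast
        ring
      rw [hfold]
      congr 1
      push_cast
      ring
    · have hr : pvRunB (x :: xs) c = 0 := by simp [pvRunB, hx]
      rw [hr]
      simp

-- main loop correspondence at a run boundary (the current char never matches the next char)
theorem pv_main : ∀ (n : Nat) (chars : List Char) (cur : String)
    (wm : PySem.Dict Int Bool) (cw : Int),
    chars.length ≤ n →
    (∀ x xs, chars = x :: xs → (String.singleton x == cur) = false) →
    pvLoopA chars cur wm cw = pvLoopB chars wm := by
  intro n
  induction n with
  | zero =>
    intro chars cur wm cw hlen _
    have : chars = [] := by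
      cases chars with
      | nil => rfl
      | cons a as => simp at hlen
    subst this
    simp [pvLoopA, pvLoopB_nil]
  | succ n ih =>
    intro chars cur wm cw hlen hbound
    cases chars with
    | nil => simp [pvLoopA, pvLoopB_nil]
    | cons c rest =>
      have hne : (String.singleton c == cur) = false := hbound c rest rfl
      -- both the "" branch and the mismatch branch of A do the same thing
      have hstep : pvLoopA (c :: rest) cur wm cw
          = pvLoopA rest (String.singleton c) (wm.insert ((c.toNat : Int) - 96) true)
              ((c.toNat : Int) - 96) := by
        by_cases hcur : (cur == "") = true
        · rw [pvLoopA, if_pos hcur]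
        · rw [pvLoopA, if_neg (by simpa using hcur), if_neg (by simp [hne])]
      rw [hstep, pv_runA]
      set r := pvRunB rest c with hr
      set w : Int := (c.toNat : Int) - 96 with hw
      have hrec : pvLoopA (rest.drop r) (String.singleton c)
            ((List.range r).foldl (fun d (k : Nat) => d.insert (w + ((k : Int) + 1) * w) true)
              (wm.insert w true))
            (w + (r : Int) * w)
          = pvLoopB (rest.drop r)
            ((List.range r).foldl (fun d (k : Nat) => d.insert (w + ((k : Int) + 1) * w) true)
              (wm.insert w true)) := by
        apply ih
        · have hd := List.length_drop (l := rest) (i := r)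
          have h2 : rest.length ≤ n := by simpa using hlen
          omega
        · intro x xs hx
          have hxc : (x == c) = false := pvRunB_drop_head rest c x xs hx
          rw [pv_singleton_beq]
          exact hxc
      rw [hrec]
      -- now match B's step
      rw [pvLoopB_cons]
      congr 1
      have hrange : PySem.List.pyRange 1 (((1 + r : Nat) : Int) + 1) 1
          = (List.range (r + 1)).map (fun (k : Nat) => (1 : Int) + (k : Int)) := by
        rw [PySem.List.pyRange_one]
        have : (((1 + r : Nat) : Int) + 1 - 1).toNat = r + 1 := by push_cast; omega
        rw [this]
      rw [hrange, List.foldl_map, pv_fold_shift]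

-- ===== VERDICT (by name: the statement is the Claim_ definition above) =====
theorem getWeightMap_spec : Claim_equal_getWeightMap := by
  intro s _
  unfold Spec_getWeightMap getWeightMap getWeightMap_alt
  congr 1
  exact pv_main s.toList.length s.toList "" PySem.Dict.empty 0 le_rfl
    (fun x xs _ => pv_singleton_ne_empty x)
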